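-- pv_equiv track=rewrite | github.com/Bob-blip-boop/Ensemble-based-classification-difficulty | semi_adaboost_difficulty.py | get_first_consis_label
-- ===== SOURCE A (Python) =====
-- def get_first_consis_label(y_pred, consistency):
--     consistent_ind = 0
--     for j in range(0,len(y_pred)-consistency+1):
--         cnt = 0
--         found = False
--         while (y_pred[j+cnt] == y_pred[j]):
--             cnt += 1
--             if cnt == consistency:
--                 consistent_ind = j
--                 found = True
--                 break
--         if found is True:
--             break
--     if found is False:
--         consistent_ind = None
--     return consistent_ind
-- ===== SOURCE B (Python) =====
-- def get_first_consis_label(y_pred, consistency):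
--     if not 1 <= consistency <= len(y_pred):
--         raise ValueError("consistency must be between 1 and len(y_pred)")
--     prev = None
--     run = 0
--     i = 0
--     for v in y_pred:
--         run = run + 1 if v == prev else 1
--         if run == consistency:
--             return i - consistency + 1
--         prev = v
--         i += 1
--     return None
-- ===== Notes on version B (the rewrite author's own statement) =====
-- stated objective: alternative
-- what changed: Replaced the nested scan (each candidate start re-scanned up to `consistency` elements) by a single left-to-right pass maintaining the current run length that returns the run start as soon as it reaches `consistency`; B validates `consistency` with an explicit ValueError on the inputs where A crashes accidentally (outside Pre_).
import Mathlib
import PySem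

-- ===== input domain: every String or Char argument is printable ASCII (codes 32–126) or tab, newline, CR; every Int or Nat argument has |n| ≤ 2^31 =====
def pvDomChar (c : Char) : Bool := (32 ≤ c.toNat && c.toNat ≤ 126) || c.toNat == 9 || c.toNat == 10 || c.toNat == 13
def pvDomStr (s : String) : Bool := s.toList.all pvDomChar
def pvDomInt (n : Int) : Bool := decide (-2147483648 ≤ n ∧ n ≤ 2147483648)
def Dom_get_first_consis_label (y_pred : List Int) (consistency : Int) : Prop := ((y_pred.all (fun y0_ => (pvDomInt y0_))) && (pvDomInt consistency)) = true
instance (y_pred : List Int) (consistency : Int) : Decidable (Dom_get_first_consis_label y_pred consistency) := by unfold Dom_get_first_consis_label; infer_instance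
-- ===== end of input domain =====

-- B replaces A's nested scan (each candidate start re-scanned up to `consistency` elements) by one
-- left-to-right pass maintaining the current run length; same return value on all inputs where A returns.

-- ===== PORT A =====
-- A's inner `while`: fuel-bounded; an out-of-range lookup (Python IndexError) yields false — unreachable under Pre_.
def pvA_while (y : List Int) (c : Int) (j : Int) (cnt : Int) : Nat → Bool
  | 0 => false
  | fuel + 1 =>
    match PySem.List.pyGet? y (j + cnt), PySem.List.pyGet? y j with
    | some a, some b =>
      if a = b then
        if cnt + 1 = c then true else pvA_while y c j (cnt + 1) fuel
      else false
    | _, _ => false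

-- A's outer `for j in range(...)` with its break; `found` never set ⇒ None.
def pvA_outer (y : List Int) (c : Int) : List Int → Option Int
  | [] => none
  | j :: js => if pvA_while y c j 0 (y.length + 1) then some j else pvA_outer y c js

def get_first_consis_label (y_pred : List Int) (consistency : Int) : Option Int :=
  pvA_outer y_pred consistency (PySem.List.pyRange 0 ((y_pred.length : Int) - consistency + 1) 1)

-- ===== PORT B =====
-- B's single pass: prev = previous element (none before the first), run = current run length, i = index.
def pvB_go (c : Int) : Option Int → Int → Int → List Int → Option Int
  | _, _, _, [] => none
  | prev, run, i, v :: rest =>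
    let run' := if some v = prev then run + 1 else 1
    if run' = c then some (i - c + 1) else pvB_go c (some v) run' (i + 1) rest

def get_first_consis_label_alt (y_pred : List Int) (consistency : Int) : Option Int :=
  -- B raises ValueError when the guard fails; `none` stands in for the exception (outside Pre_)
  if 1 ≤ consistency ∧ consistency ≤ (y_pred.length : Int) then pvB_go consistency none 0 0 y_pred
  else none

-- ===== PRECONDITION & SPEC =====
-- Pre_ excludes exactly the inputs on which A raises: consistency ≤ 0 (IndexError while scanning past
-- the end) and consistency > len(y_pred) (the loop body never runs and `found` is unbound).
def Pre_get_first_consis_label (y_pred : List Int) (consistency : Int) : Prop :=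
  1 ≤ consistency ∧ consistency ≤ (y_pred.length : Int)
instance (y_pred : List Int) (consistency : Int) : Decidable (Pre_get_first_consis_label y_pred consistency) := by unfold Pre_get_first_consis_label; infer_instance

def pvWitness_get_first_consis_label : List Int × Int := ([1, 1, 2], 2)

def Spec_get_first_consis_label (y_pred : List Int) (consistency : Int) (out : Option Int) : Prop := out = get_first_consis_label_alt y_pred consistency
instance (y_pred : List Int) (consistency : Int) (out : Option Int) : Decidable (Spec_get_first_consis_label y_pred consistency out) := by unfold Spec_get_first_consis_label; infer_instance

-- ===== CLAIM (what is proved, stated in full; the proofs are below) =====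
def Claim_equal_get_first_consis_label : Prop := ∀ (y_pred : List Int) (consistency : Int), Dom_get_first_consis_label y_pred consistency → Pre_get_first_consis_label y_pred consistency → Spec_get_first_consis_label y_pred consistency (get_first_consis_label y_pred consistency)

-- ===== LEMMAS AND PROOFS =====

-- Length of the maximal prefix of l whose elements all equal v.
def pvExt (v : Int) : List Int → Nat
  | [] => 0
  | a :: t => if a = v then pvExt v t + 1 else 0

def pvExtO : Option Int → List Int → Nat
  | none, _ => 0
  | some v, l => pvExt v l

-- "a run of length ≥ c starts at index j"
def pvWin (y : List Int) (c : Int) (j : Nat) : Bool := decide (c ≤ (pvExt (y.getD j 0) (y.drop j) : Int))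

-- first start index of a ≥ c run, among 0 .. len - c
def pvFirstWin (y : List Int) (c : Int) : Option Nat :=
  (List.range (y.length + 1 - c.toNat)).find? (pvWin y c)

theorem pvExt_le_length (v : Int) (l : List Int) : pvExt v l ≤ l.length := by
  induction l with
  | nil => simp [pvExt]
  | cons a t ih => simp only [pvExt, List.length_cons]; split <;> omega

theorem pvExt_cons_self (a : Int) (t : List Int) : pvExt a (a :: t) = pvExt a t + 1 := by
  simp [pvExt]

theorem pvFirstWin_nil (c : Int) (hc : 1 ≤ c) : pvFirstWin ([] : List Int) c = none := by
  unfold pvFirstWin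
  have h : ([] : List Int).length + 1 - c.toNat = 0 := by simp; omega
  rw [h]
  rfl

theorem pv_find?_congr {α : Type} (l : List α) (p q : α → Bool)
    (h : ∀ x ∈ l, p x = q x) : l.find? p = l.find? q := by
  induction l with
  | nil => rfl
  | cons a t ih =>
    rw [List.find?_cons, List.find?_cons, h a (by simp)]
    split
    · rfl
    · exact ih (fun x hx => h x (by simp [hx]))

theorem pvFirstWin_cons (a : Int) (t : List Int) (c : Int) (hc : 1 ≤ c) :
    pvFirstWin (a :: t) c = if pvWin (a :: t) c 0 then some 0 else (pvFirstWin t c).map (· + 1) := by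
  unfold pvFirstWin
  rcases h : (a :: t).length + 1 - c.toNat with _ | k
  · have hle : (a :: t).length + 1 ≤ c.toNat := by omega
    have hb := pvExt_le_length ((a :: t).getD 0 0) (a :: t)
    have h0 : pvWin (a :: t) c 0 = false := by
      simp only [pvWin, List.drop_zero, decide_eq_false_iff_not, not_le]
      simp only [List.length_cons] at hle hb
      omega
    have ht : t.length + 1 - c.toNat = 0 := by simp only [List.length_cons] at h; omega
    rw [h0, ht]
    simp
  · have hk : k = t.length + 1 - c.toNat := by simp only [List.length_cons] at h; omega
    rw [List.range_succ_eq_map, hk]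
    cases h0 : pvWin (a :: t) c 0 with
    | true =>
      rw [List.find?_cons_of_pos h0]
      simp
    | false =>
      rw [List.find?_cons_of_neg (by simp [h0])]
      simp only [Bool.false_eq_true, if_false]
      rw [List.find?_map]
      congr 1

theorem pvFirstWin_head (y : List Int) (c : Int) (hc : 1 ≤ c)
    (h : c ≤ (pvExtO y.head? y : Int)) : pvFirstWin y c = some 0 := by
  cases y with
  | nil =>
    have : pvExtO ([] : List Int).head? ([] : List Int) = 0 := rfl
    rw [this] at h
    simp at h
    omega
  | cons a t =>
    rw [pvFirstWin_cons a t c hc]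
    have hw : pvWin (a :: t) c 0 = true := by
      simp only [pvWin, decide_eq_true_iff, List.drop_zero, List.getD_cons_zero]
      have : pvExtO (a :: t).head? (a :: t) = pvExt a (a :: t) := rfl
      rw [this] at h
      exact h
    rw [if_pos hw]

theorem pvFirstWin_skip (y : List Int) (c : Int) (hc : 1 ≤ c)
    (h : (pvExtO y.head? y : Int) < c) :
    pvFirstWin y c = (pvFirstWin (y.drop (pvExtO y.head? y)) c).map (· + pvExtO y.head? y) := by
  induction y with
  | nil =>
    have h0 : pvExtO ([] : List Int).head? ([] : List Int) = 0 := rfl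
    rw [h0]
    simp [pvFirstWin_nil c hc]
  | cons a t ih =>
    have hhead : pvExtO (a :: t).head? (a :: t) = pvExt a (a :: t) := rfl
    have hwin0 : pvWin (a :: t) c 0 = false := by
      simp only [pvWin, decide_eq_false_iff_not, not_le, List.drop_zero, List.getD_cons_zero]
      rw [hhead] at h
      omega
    have hF := pvFirstWin_cons a t c hc
    rw [if_neg (by simp [hwin0])] at hF
    cases t with
    | nil =>
      rw [hF, hhead, pvExt_cons_self]
      have h0 : pvExt a ([] : List Int) = 0 := rfl
      rw [h0]
      simp [pvFirstWin_nil c hc]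
    | cons b t' =>
      by_cases hba : b = a
      · subst hba
        have e1 : pvExtO (b :: b :: t').head? (b :: b :: t') = pvExt b t' + 1 + 1 := by
          have : pvExtO (b :: b :: t').head? (b :: b :: t') = pvExt b (b :: b :: t') := rfl
          rw [this, pvExt_cons_self, pvExt_cons_self]
        have e2 : pvExtO (b :: t').head? (b :: t') = pvExt b t' + 1 := by
          have : pvExtO (b :: t').head? (b :: t') = pvExt b (b :: t') := rfl
          rw [this, pvExt_cons_self]
        have hlt : (pvExtO (b :: t').head? (b :: t') : Int) < c := by
          rw [e1] at h
          rw [e2]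
          push_cast at h ⊢
          omega
        rw [hF, ih hlt, e1, e2, List.drop_succ_cons, List.drop_succ_cons, List.drop_succ_cons]
        cases pvFirstWin (t'.drop (pvExt b t')) c with
        | none => rfl
        | some n =>
          simp only [Option.map_some, Option.some.injEq]
          omega
      · have e1 : pvExtO (a :: b :: t').head? (a :: b :: t') = 1 := by
          have h1 : pvExtO (a :: b :: t').head? (a :: b :: t') = pvExt a (a :: b :: t') := rfl
          have h2 : pvExt a (b :: t') = 0 := by simp [pvExt, hba]
          rw [h1, pvExt_cons_self, h2]
        rw [hF, e1, List.drop_succ_cons, List.drop_zero]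

theorem pvB_go_spec (l : List Int) (c : Int) (prev : Option Int) (run i : Int)
    (hc : 1 ≤ c) (hr0 : 0 ≤ run) (hrc : run < c) :
    pvB_go c prev run i l =
      if c ≤ run + (pvExtO prev l : Int) then some (i - run)
      else (pvFirstWin (l.drop (pvExtO prev l)) c).map (fun j : Nat => i + (pvExtO prev l : Int) + (j : Int)) := by
  induction l generalizing prev run i with
  | nil =>
    have hext : pvExtO prev ([] : List Int) = 0 := by cases prev <;> rfl
    have hneg : ¬ c ≤ run + ((pvExtO prev ([] : List Int) : Nat) : Int) := by
      rw [hext]; push_cast; omega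
    rw [if_neg hneg, hext]
    simp only [List.drop_nil, pvFirstWin_nil c hc]
    rfl
  | cons a t ih =>
    by_cases hp : (some a : Option Int) = prev
    · subst hp
      have hext : pvExtO (some a) (a :: t) = pvExt a t + 1 := by
        have : pvExtO (some a) (a :: t) = pvExt a (a :: t) := rfl
        rw [this, pvExt_cons_self]
      have hext2 : pvExtO (some a) t = pvExt a t := rfl
      by_cases hrun : run + 1 = c
      · have hred : pvB_go c (some a) run i (a :: t) = some (i - c + 1) := by
          simp [pvB_go, hrun]
        rw [hred, hext, if_pos (by push_cast; omega)]
        congr 1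
        omega
      · have hred : pvB_go c (some a) run i (a :: t) = pvB_go c (some a) (run + 1) (i + 1) t := by
          simp [pvB_go, hrun]
        rw [hred, ih (some a) (run + 1) (i + 1) (by omega) (by omega), hext, hext2]
        by_cases hcond : c ≤ run + 1 + (pvExt a t : Int)
        · rw [if_pos hcond, if_pos (by push_cast at hcond ⊢; omega)]
          congr 1
          omega
        · rw [if_neg hcond, if_neg (by push_cast at hcond ⊢; omega), List.drop_succ_cons]
          cases pvFirstWin (t.drop (pvExt a t)) c with
          | none => rfl
          | some n =>
            simp only [Option.map_some, Option.some.injEq]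
            push_cast
            ring
    · have hext : pvExtO prev (a :: t) = 0 := by
        cases prev with
        | none => rfl
        | some w =>
          have haw : a ≠ w := fun hh => hp (by rw [hh])
          simp [pvExtO, pvExt, haw]
      rw [hext, if_neg (by push_cast; omega)]
      simp only [List.drop_zero, Nat.cast_zero, add_zero]
      have hhead : pvExtO (a :: t).head? (a :: t) = pvExt a t + 1 := by
        have : pvExtO (a :: t).head? (a :: t) = pvExt a (a :: t) := rfl
        rw [this, pvExt_cons_self]
      by_cases hone : (1 : Int) = c
      · have hred : pvB_go c prev run i (a :: t) = some (i - c + 1) := by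
          simp [pvB_go, hp, ← hone]
        rw [hred]
        have hfw : pvFirstWin (a :: t) c = some 0 := by
          apply pvFirstWin_head _ _ hc
          rw [hhead]
          push_cast
          omega
        rw [hfw]
        simp only [Option.map_some, Option.some.injEq, Nat.cast_zero]
        omega
      · have hred : pvB_go c prev run i (a :: t) = pvB_go c (some a) 1 (i + 1) t := by
          simp [pvB_go, hp, hone]
        rw [hred, ih (some a) 1 (i + 1) (by omega) (by omega)]
        have hext2 : pvExtO (some a) t = pvExt a t := rfl
        rw [hext2]
        by_cases hcond : c ≤ 1 + (pvExt a t : Int)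
        · rw [if_pos hcond]
          have hfw : pvFirstWin (a :: t) c = some 0 := by
            apply pvFirstWin_head _ _ hc
            rw [hhead]
            push_cast
            omega
          rw [hfw]
          simp only [Option.map_some, Option.some.injEq, Nat.cast_zero]
          omega
        · rw [if_neg hcond]
          have hlt : (pvExtO (a :: t).head? (a :: t) : Int) < c := by
            rw [hhead]
            push_cast at hcond ⊢
            omega
          rw [pvFirstWin_skip (a :: t) c hc hlt, hhead, List.drop_succ_cons]
          cases pvFirstWin (t.drop (pvExt a t)) c with
          | none => rfl
          | some n =>
            simp only [Option.map_some, Option.some.injEq]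
            push_cast
            ring

theorem pvB_main (y : List Int) (c : Int) (hc : 1 ≤ c) (hcl : c ≤ (y.length : Int)) :
    get_first_consis_label_alt y c = (pvFirstWin y c).map (fun n : Nat => (n : Int)) := by
  unfold get_first_consis_label_alt
  rw [if_pos ⟨hc, hcl⟩, pvB_go_spec y c none 0 0 hc le_rfl (by omega)]
  have hext : pvExtO none y = 0 := rfl
  rw [hext, if_neg (by push_cast; omega)]
  simp only [List.drop_zero, Nat.cast_zero]
  cases pvFirstWin y c with
  | none => rfl
  | some n =>
    simp only [Option.map_some, Option.some.injEq]
    omega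

theorem pvA_while_spec (d : List Int) (fuel : Nat) :
    ∀ (y : List Int) (c v : Int) (jn cn : Nat),
    y.drop (jn + cn) = d → PySem.List.pyGet? y (jn : Int) = some v → d.length < fuel → (cn : Int) < c →
    pvA_while y c (jn : Int) (cn : Int) fuel = decide (c ≤ (cn : Int) + (pvExt v d : Int)) := by
  induction d generalizing fuel with
  | nil =>
    intro y c v jn cn hd hv hfuel hcn
    cases fuel with
    | zero => omega
    | succ f =>
      have hnone : PySem.List.pyGet? y ((jn : Int) + (cn : Int)) = none := by
        rw [show ((jn : Int) + (cn : Int)) = ((jn + cn : Nat) : Int) by push_cast; ring,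
          PySem.List.pyGet?_natCast]
        have hx : y[jn + cn]? = (y.drop (jn + cn))[0]? := by simp [List.getElem?_drop]
        rw [hx, hd]
        rfl
      simp only [pvA_while, hnone]
      have : pvExt v ([] : List Int) = 0 := rfl
      rw [this]
      simp only [Nat.cast_zero, add_zero]
      symm
      simp only [decide_eq_false_iff_not, not_le]
      omega
  | cons a t ih =>
    intro y c v jn cn hd hv hfuel hcn
    cases fuel with
    | zero => omega
    | succ f =>
      have hsome : PySem.List.pyGet? y ((jn : Int) + (cn : Int)) = some a := by
        rw [show ((jn : Int) + (cn : Int)) = ((jn + cn : Nat) : Int) by push_cast; ring,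
          PySem.List.pyGet?_natCast]
        have hx : y[jn + cn]? = (y.drop (jn + cn))[0]? := by simp [List.getElem?_drop]
        rw [hx, hd]
        rfl
      simp only [pvA_while, hsome, hv]
      by_cases hav : a = v
      · subst hav
        rw [if_pos rfl, pvExt_cons_self]
        by_cases hc1 : (cn : Int) + 1 = c
        · rw [if_pos hc1]
          symm
          simp only [decide_eq_true_iff]
          push_cast
          omega
        · rw [if_neg hc1]
          have hdt : y.drop (jn + (cn + 1)) = t := by
            have hdd : y.drop (jn + cn + 1) = (y.drop (jn + cn)).tail := by
              rw [← List.drop_drop]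
              simp
            rw [show jn + (cn + 1) = jn + cn + 1 by ring, hdd, hd]
            rfl
          have hlen : t.length < f := by
            simp only [List.length_cons] at hfuel
            omega
          have hrec := ih f y c a jn (cn + 1) hdt hv hlen (by push_cast; omega)
          rw [show ((cn : Int) + 1) = ((cn + 1 : Nat) : Int) by push_cast; ring, hrec]
          rw [decide_eq_decide]
          push_cast
          omega
      · rw [if_neg hav]
        have h0 : pvExt v (a :: t) = 0 := by simp [pvExt, hav]
        rw [h0]
        symm
        simp only [Nat.cast_zero, add_zero, decide_eq_false_iff_not, not_le]
        omega

theorem pvA_outer_eq_find? (y : List Int) (c : Int) (js : List Nat) :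
    pvA_outer y c (js.map (fun n : Nat => (n : Int))) =
      (js.find? (fun n : Nat => pvA_while y c (n : Int) 0 (y.length + 1))).map (fun n : Nat => (n : Int)) := by
  induction js with
  | nil => rfl
  | cons j t ih =>
    simp only [List.map_cons, pvA_outer, List.find?_cons]
    cases h : pvA_while y c (j : Int) 0 (y.length + 1) with
    | true => simp
    | false => simp [ih]

theorem pvA_main (y : List Int) (c : Int) (hc : 1 ≤ c) (hcl : c ≤ (y.length : Int)) :
    get_first_consis_label y c = (pvFirstWin y c).map (fun n : Nat => (n : Int)) := by
  unfold get_first_consis_label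
  rw [PySem.List.pyRange_one]
  rw [show ((y.length : Int) - c + 1 - 0).toNat = y.length + 1 - c.toNat by omega]
  simp only [zero_add]
  rw [pvA_outer_eq_find?]
  unfold pvFirstWin
  congr 1
  apply pv_find?_congr
  intro n hn
  have hnlen : n < y.length := by
    simp only [List.mem_range] at hn
    omega
  have hget : PySem.List.pyGet? y (n : Int) = some (y.getD n 0) := by
    rw [PySem.List.pyGet?_natCast, List.getElem?_eq_getElem hnlen, List.getD_eq_getElem y 0 hnlen]
  have hd : y.drop (n + 0) = y.drop n := by rw [Nat.add_zero]
  have hlen : (y.drop n).length < y.length + 1 := by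
    simp only [List.length_drop]
    omega
  have hrec := pvA_while_spec (y.drop n) (y.length + 1) y c (y.getD n 0) n 0 hd hget hlen
    (by push_cast; omega)
  rw [show ((0 : Nat) : Int) = (0 : Int) from rfl] at hrec
  rw [hrec]
  unfold pvWin
  rw [decide_eq_decide]
  omega

-- ===== VERDICT (by name: the statement is the Claim_ definition above) =====
theorem get_first_consis_label_spec : Claim_equal_get_first_consis_label := by
  intro y c _ hpre
  unfold Spec_get_first_consis_label
  rw [pvA_main y c hpre.1 hpre.2, pvB_main y c hpre.1 hpre.2]
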